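-- pv_equiv track=rewrite | github.com/reymond-group/PDGA-MAP4_AP | pdga/sequence.py | find_aa_b_pos
-- ===== SOURCE A (Python) =====
-- B_SMILES = {'1': '[N:2][C@@H](C[N:2])[C:1](O)=O', '2': '[N:2][C@@H](CC[N:2])[C:1](O)=O',
--             '3': '[N:2][C@@H](CCC[N:2])[C:1](O)=O', '4': '[N:2][C@@H](CCCC[N:2])[C:1](O)=O',
--             '5': '[N:2][C@H](C[N:2])[C:1](O)=O', '6': '[N:2][C@H](CC[N:2])[C:1](O)=O',
--             '7': '[N:2][C@H](CCC[N:2])[C:1](O)=O', '8': '[N:2][C@H](CCCC[N:2])[C:1](O)=O'}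
--
-- AA_SMILES = {'A': '[N:2][C@@H](C)[C:1](O)=O', 'R': '[N:2][C@@H](CCCNC(N)=N)[C:1](O)=O',
--                 'N': '[N:2][C@@H](CC(N)=O)[C:1](O)=O', 'D': '[N:2][C@@H](CC(O)=O)[C:1](O)=O',
--                 'C': '[N:2][C@@H](CS)[C:1](O)=O', 'Q': '[N:2][C@@H](CCC(N)=O)[C:1](O)=O',
--                 'E': '[N:2][C@@H](CCC(O)=O)[C:1](O)=O', 'G': '[N:2]C[C:1](O)=O',
--                 'H': '[N:2][C@@H](CC1=CNC=N1)[C:1](O)=O', 'I': '[N:2][C@@H]([C@@H](C)CC)[C:1](O)=O',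
--                 'K': '[N:2][C@@H](CCCCN)[C:1](O)=O', 'L': '[N:2][C@@H](CC(C)C)[C:1](O)=O',
--                 'M': '[N:2][C@@H](CCSC)[C:1](O)=O', 'F': '[N:2][C@@H](CC1=CC=CC=C1)[C:1](O)=O',
--                 'P': 'C1CC[N:2][C@@H]1[C:1](O)=O', 'S': '[N:2][C@@H](CO)[C:1](O)=O',
--                 'T': '[N:2][C@@H]([C@H](O)C)[C:1](O)=O', 'W': '[N:2][C@@H](CC1=CNC2=CC=CC=C12)[C:1](O)=O',
--                 'Y': '[N:2][C@@H](CC1=CC=C(C=C1)O)[C:1](O)=O', 'V': '[N:2][C@@H](C(C)C)[C:1](O)=O',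
--                 'Ä': '[N:2][C@@H](C[S:1])[C:1](O)=O', 'Ö': '[N:2][C@@H](C[S:2])[C:1](O)=O',
--                 'Ü': '[N:2][C@@H](C[S:3])[C:1](O)=O',
--                 'Z': 'C1C(O)C[N:2][C@@H]1[C:1](O)=O',
--                 'O': '[N:2][C@@H](CCCN)[C:1](O)=O',
--                 'a': '[N:2][C@H](C)[C:1](O)=O', 'r': '[N:2][C@H](CCCNC(N)=N)[C:1](O)=O',
--                 'n': '[N:2][C@H](CC(N)=O)[C:1](O)=O', 'd': '[N:2][C@H](CC(O)=O)[C:1](O)=O',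
--                 'c': '[N:2][C@H](CS)[C:1](O)=O', 'q': '[N:2][C@H](CCC(N)=O)[C:1](O)=O',
--                 'e': '[N:2][C@H](CCC(O)=O)[C:1](O)=O', 'g': '[N:2]C[C:1](O)=O',
--                 'h': '[N:2][C@H](CC1=CNC=N1)[C:1](O)=O', 'i': '[N:2][C@H]([C@@H](C)CC)[C:1](O)=O',
--                 'k': '[N:2][C@H](CCCCN)[C:1](O)=O', 'l': '[N:2][C@H](CC(C)C)[C:1](O)=O',
--                 'm': '[N:2][C@H](CCSC)[C:1](O)=O', 'f': '[N:2][C@H](CC1=CC=CC=C1)[C:1](O)=O',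
--                 'p': 'C1CC[N:2][C@H]1[C:1](O)=O', 's': '[N:2][C@H](CO)[C:1](O)=O',
--                 't': '[N:2][C@H]([C@H](O)C)[C:1](O)=O', 'w': '[N:2][C@H](CC1=CNC2=CC=CC=C12)[C:1](O)=O',
--                 'y': '[N:2][C@H](CC1=CC=C(C=C1)O)[C:1](O)=O', 'v': '[N:2][C@H](C(C)C)[C:1](O)=O',
--                 'ä': '[N:2][C@H](C[S:1])[C:1](O)=O', 'ö': '[N:2][C@H](C[S:2])[C:1](O)=O',
--                 'ü': '[N:2][C@H](C[S:3])[C:1](O)=O',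
--                 '!': '[N:2]CC[C:1](O)=O', '?': '[N:2]CCC[C:1](O)=O',
--                 '=': '[N:2]CCCC[C:1](O)=O', '%': '[N:2]CCCCC[C:1](O)=O',
--                 '$': '[N:2]CCCCCC[C:1](O)=O', '@': '[N:2]CCCCCCC[C:1](O)=O',
--                 '#': '[N:2]CC[C:1](O)=O'}
--
-- CT = ['+']
--
-- NT = ['&']
--
-- def find_aa_b_pos(seq):
--     """finds aminoacids and branching unit positions in a given sequence
--
--     Arguments:
--         seq {string} -- peptide dendrimer sequence
--
--     Returns:
--         lists -- aminoacids and branching units positions, all position, terminal pos, capping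
--     """
--
--     aa = []
--     b = []
--     all_pos = []
--     met = []
--
--     for i, symbol in enumerate(seq):
--         if symbol in ['X', 'Ö', 'Ü', 'Ä', 'ö', 'ü', 'ä'] + NT + CT:
--             continue
--         if symbol == '-':
--             met.append(i)
--             continue
--         if symbol in B_SMILES.keys():
--             b.append(i)
--         elif symbol in AA_SMILES.keys():
--             aa.append(i)
--         all_pos.append(i)
--
--     return aa, b, met, all_pos
-- ===== SOURCE B (Python) =====
-- B_SMILES = {'1': '[N:2][C@@H](C[N:2])[C:1](O)=O', '2': '[N:2][C@@H](CC[N:2])[C:1](O)=O',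
--             '3': '[N:2][C@@H](CCC[N:2])[C:1](O)=O', '4': '[N:2][C@@H](CCCC[N:2])[C:1](O)=O',
--             '5': '[N:2][C@H](C[N:2])[C:1](O)=O', '6': '[N:2][C@H](CC[N:2])[C:1](O)=O',
--             '7': '[N:2][C@H](CCC[N:2])[C:1](O)=O', '8': '[N:2][C@H](CCCC[N:2])[C:1](O)=O'}
--
-- AA_KEYS = ('ARNDCQEGHIKLMFPSTWYVÄÖÜZOarndcqeghiklmfpstwyväöü' '!?=%$@#')
--
-- CT = ['+']
-- NT = ['&']
--
-- SKIP = {'X', 'Ö', 'Ü', 'Ä', 'ö', 'ü', 'ä'} | set(NT) | set(CT)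
-- B_SET = frozenset(B_SMILES)
-- AA_SET = frozenset(AA_KEYS)
--
--
-- def find_aa_b_pos(seq):
--     """finds aminoacids and branching unit positions: four independent scans."""
--     aa = [i for i, s in enumerate(seq) if s in AA_SET and s not in SKIP]
--     b = [i for i, s in enumerate(seq) if s in B_SET]
--     met = [i for i, s in enumerate(seq) if s == '-']
--     all_pos = [i for i, s in enumerate(seq) if s not in SKIP and s != '-']
--     return aa, b, met, all_pos
-- ===== Notes on version B (the rewrite author's own statement) =====
-- stated objective: simpler
-- what changed: replaces the single four-way-branching loop with four independent comprehensions over enumerate(seq), each stating its set-membership condition directly (using that B_SMILES and AA_SMILES keys are disjoint and never skipped)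
import Mathlib
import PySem

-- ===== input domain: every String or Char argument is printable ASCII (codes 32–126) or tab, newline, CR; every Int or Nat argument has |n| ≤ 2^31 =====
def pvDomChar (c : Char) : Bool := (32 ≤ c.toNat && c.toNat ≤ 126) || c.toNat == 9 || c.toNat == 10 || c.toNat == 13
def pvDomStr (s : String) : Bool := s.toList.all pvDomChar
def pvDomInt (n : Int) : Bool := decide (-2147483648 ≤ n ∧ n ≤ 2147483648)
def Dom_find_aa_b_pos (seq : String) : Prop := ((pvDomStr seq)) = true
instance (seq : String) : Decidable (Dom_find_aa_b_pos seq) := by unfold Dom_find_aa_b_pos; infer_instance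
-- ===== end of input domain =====

-- B replaces A's single four-way-branching loop with four independent filtered scans
-- over enumerate(seq); same cost, simpler decomposition. Proved equal on all of Dom.


-- ===== PORT A =====
-- keys of B_SMILES / AA_SMILES (only the keys matter for this function)
def pvBKeys : List Char := ['1','2','3','4','5','6','7','8']

def pvAAKeys : List Char :=
  ['A','R','N','D','C','Q','E','G','H','I','K','L','M','F','P','S','T','W','Y','V',
   'Ä','Ö','Ü','Z','O',
   'a','r','n','d','c','q','e','g','h','i','k','l','m','f','p','s','t','w','y','v',
   'ä','ö','ü','!','?','=','%','$','@','#']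

-- ['X','Ö','Ü','Ä','ö','ü','ä'] + NT + CT, as in A's first branch
def pvSkipList : List Char := ['X','Ö','Ü','Ä','ö','ü','ä'] ++ ['&'] ++ ['+']

-- one iteration of A's loop; state = (aa, b, all_pos, met)
def pvStepA (st : List Int × List Int × List Int × List Int) (p : Int × Char) :
    List Int × List Int × List Int × List Int :=
  let (aa, b, all_pos, met) := st
  if p.2 ∈ pvSkipList then (aa, b, all_pos, met)
  else if p.2 = '-' then (aa, b, all_pos, met ++ [p.1])
  else if p.2 ∈ pvBKeys then (aa, b ++ [p.1], all_pos ++ [p.1], met)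
  else if p.2 ∈ pvAAKeys then (aa ++ [p.1], b, all_pos ++ [p.1], met)
  else (aa, b, all_pos ++ [p.1], met)

def find_aa_b_pos (seq : String) : List Int × List Int × List Int × List Int :=
  let st := (PySem.List.enumerate seq.toList 0).foldl pvStepA ([], [], [], [])
  (st.1, st.2.1, st.2.2.2, st.2.2.1)

-- ===== PORT B =====
def find_aa_b_pos_alt (seq : String) : List Int × List Int × List Int × List Int :=
  let e := PySem.List.enumerate seq.toList 0
  let aa := (e.filter (fun p => decide (p.2 ∈ pvAAKeys) && !decide (p.2 ∈ pvSkipList))).map Prod.fst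
  let b := (e.filter (fun p => decide (p.2 ∈ pvBKeys))).map Prod.fst
  let met := (e.filter (fun p => decide (p.2 = '-'))).map Prod.fst
  let all_pos := (e.filter (fun p => !decide (p.2 ∈ pvSkipList) && !decide (p.2 = '-'))).map Prod.fst
  (aa, b, met, all_pos)

-- ===== PRECONDITION & SPEC =====
def Spec_find_aa_b_pos (seq : String) (out : List Int × List Int × List Int × List Int) : Prop := out = find_aa_b_pos_alt seq
instance (seq : String) (out : List Int × List Int × List Int × List Int) : Decidable (Spec_find_aa_b_pos seq out) := by unfold Spec_find_aa_b_pos; infer_instance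

-- ===== CLAIM (what is proved, stated in full; the proofs are below) =====
def Claim_equal_find_aa_b_pos : Prop := ∀ (seq : String), Dom_find_aa_b_pos seq → Spec_find_aa_b_pos seq (find_aa_b_pos seq)

-- ===== LEMMAS AND PROOFS =====

-- A's loop as four filters, with A's own branch conditions
theorem pv_foldA (l : List (Int × Char)) (aa0 b0 all0 met0 : List Int) :
    l.foldl pvStepA (aa0, b0, all0, met0) =
      (aa0 ++ (l.filter (fun p => !decide (p.2 ∈ pvSkipList) && !decide (p.2 = '-') &&
                 !decide (p.2 ∈ pvBKeys) && decide (p.2 ∈ pvAAKeys))).map Prod.fst,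
       b0 ++ (l.filter (fun p => !decide (p.2 ∈ pvSkipList) && !decide (p.2 = '-') &&
                 decide (p.2 ∈ pvBKeys))).map Prod.fst,
       all0 ++ (l.filter (fun p => !decide (p.2 ∈ pvSkipList) && !decide (p.2 = '-'))).map Prod.fst,
       met0 ++ (l.filter (fun p => !decide (p.2 ∈ pvSkipList) && decide (p.2 = '-'))).map Prod.fst) := by
  induction l generalizing aa0 b0 all0 met0 with
  | nil => simp
  | cons p t ih =>
    by_cases h1 : p.2 ∈ pvSkipList
    · simp [pvStepA, h1, ih]
    · by_cases h2 : p.2 = '-'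
      · have h1' : ¬ ('-' ∈ pvSkipList) := by decide
        simp [pvStepA, h2, h1', ih]
      · by_cases h3 : p.2 ∈ pvBKeys
        · simp [pvStepA, h1, h2, h3, ih]
        · by_cases h4 : p.2 ∈ pvAAKeys
          · simp [pvStepA, h1, h2, h3, h4, ih]
          · simp [pvStepA, h1, h2, h3, h4, ih]

-- pointwise: A's aa condition equals B's (AA keys are never branching keys nor '-')
theorem pv_aa_cond (c : Char) :
    (!decide (c ∈ pvSkipList) && !decide (c = '-') && !decide (c ∈ pvBKeys) && decide (c ∈ pvAAKeys))
      = (decide (c ∈ pvAAKeys) && !decide (c ∈ pvSkipList)) := by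
  by_cases hA : c ∈ pvAAKeys
  · have h := List.all_eq_true.mp
      (by decide : pvAAKeys.all (fun x => !decide (x ∈ pvBKeys) && !decide (x = '-')) = true) c hA
    simp only [Bool.and_eq_true, Bool.not_eq_true', decide_eq_false_iff_not] at h
    simp [hA, h.1, h.2]
  · simp [hA]

-- pointwise: A's b condition equals B's (branching keys are never skipped, never '-')
theorem pv_b_cond (c : Char) :
    (!decide (c ∈ pvSkipList) && !decide (c = '-') && decide (c ∈ pvBKeys))
      = decide (c ∈ pvBKeys) := by
  by_cases hB : c ∈ pvBKeys
  · have h := List.all_eq_true.mp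
      (by decide : pvBKeys.all (fun x => !decide (x ∈ pvSkipList) && !decide (x = '-')) = true) c hB
    simp only [Bool.and_eq_true, Bool.not_eq_true', decide_eq_false_iff_not] at h
    simp [hB, h.1, h.2]
  · simp [hB]

-- pointwise: A's met condition equals B's ('-' is not a skipped symbol)
theorem pv_met_cond (c : Char) :
    (!decide (c ∈ pvSkipList) && decide (c = '-')) = decide (c = '-') := by
  by_cases h : c = '-'
  · subst h; decide
  · simp [h]

-- ===== VERDICT (by name: the statement is the Claim_ definition above) =====
theorem find_aa_b_pos_spec : Claim_equal_find_aa_b_pos := by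
  intro seq _
  show find_aa_b_pos seq = find_aa_b_pos_alt seq
  unfold find_aa_b_pos find_aa_b_pos_alt
  rw [pv_foldA]
  have e1 : (fun p : Int × Char => !decide (p.2 ∈ pvSkipList) && !decide (p.2 = '-') &&
        !decide (p.2 ∈ pvBKeys) && decide (p.2 ∈ pvAAKeys))
      = (fun p : Int × Char => decide (p.2 ∈ pvAAKeys) && !decide (p.2 ∈ pvSkipList)) :=
    funext fun p => pv_aa_cond p.2
  have e2 : (fun p : Int × Char => !decide (p.2 ∈ pvSkipList) && !decide (p.2 = '-') &&
        decide (p.2 ∈ pvBKeys)) = (fun p : Int × Char => decide (p.2 ∈ pvBKeys)) :=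
    funext fun p => pv_b_cond p.2
  have e3 : (fun p : Int × Char => !decide (p.2 ∈ pvSkipList) && decide (p.2 = '-'))
      = (fun p : Int × Char => decide (p.2 = '-')) :=
    funext fun p => pv_met_cond p.2
  rw [e1, e2, e3]
  simp
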